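-- pv_equiv track=rewrite | github.com/dwihermawanandara-robo/scientific-literature-agent | app.py | is_journal_header_line
-- ===== SOURCE A (Python) =====
-- def is_journal_header_line(line: str) -> bool:
--     lower = line.lower()
--     journal_keywords = [
--         "ieee transactions",
--         "ieee access",
--         "international journal",
--         "transactions on",
--         "vol.",
--         "no.",
--         "january",
--         "february",
--         "march",
--         "april",
--         "may",
--         "june",
--         "july",
--         "august",
--         "september",
--         "october",
--         "november",
--         "december",
--     ]
--     return any(keyword in lower for keyword in journal_keywords)
-- ===== SOURCE B (Python) =====
-- _JOURNAL_KEYWORDS = (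
--     "ieee transactions",
--     "ieee access",
--     "international journal",
--     "transactions on",
--     "vol.",
--     "no.",
--     "january",
--     "february",
--     "march",
--     "april",
--     "may",
--     "june",
--     "july",
--     "august",
--     "september",
--     "october",
--     "november",
--     "december",
-- )
--
--
-- def is_journal_header_line(line: str) -> bool:
--     lower = line.lower()
--     # single left-to-right scan: at each position test whether any keyword starts there
--     return any(lower.startswith(_JOURNAL_KEYWORDS, i) for i in range(len(lower) + 1))
-- ===== Notes on version B (the rewrite author's own statement) =====
-- stated objective: alternative
-- what changed: B replaces A's per-keyword substring search (any(keyword in lower)) by a single left-to-right position scan of the lowered line, testing at each index whether any keyword starts there via startswith with a keyword tuple and an offset.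
import Mathlib
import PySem

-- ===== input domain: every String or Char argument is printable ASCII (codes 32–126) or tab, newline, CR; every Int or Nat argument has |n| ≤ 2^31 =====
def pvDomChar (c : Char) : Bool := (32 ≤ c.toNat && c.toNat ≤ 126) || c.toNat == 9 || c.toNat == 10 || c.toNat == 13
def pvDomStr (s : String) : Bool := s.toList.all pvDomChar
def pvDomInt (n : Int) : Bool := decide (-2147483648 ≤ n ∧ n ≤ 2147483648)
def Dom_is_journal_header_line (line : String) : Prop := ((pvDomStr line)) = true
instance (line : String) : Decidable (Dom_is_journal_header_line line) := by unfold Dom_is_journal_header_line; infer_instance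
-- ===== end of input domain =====

-- ===== PORT A =====
-- B changes: one left-to-right scan over the lowered line testing each position for a keyword prefix,
-- instead of A's per-keyword substring search (objective: alternative traversal; return value only).
def pvJournalKeywords : List String :=
  ["ieee transactions", "ieee access", "international journal", "transactions on",
   "vol.", "no.", "january", "february", "march", "april", "may", "june", "july",
   "august", "september", "october", "november", "december"]

def is_journal_header_line (line : String) : Bool :=
  let lower := PySem.Str.lower line
  pvJournalKeywords.any (fun keyword => PySem.Str.isIn keyword lower)

-- ===== PORT B =====
-- exact port of Source B: lower.startswith(kws, i) for 0 ≤ i ≤ len(lower) is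
-- "some keyword is a prefix of lower[i:]" — ported by hand as isPrefixOf on the dropped list (exact there).
def is_journal_header_line_alt (line : String) : Bool :=
  let cl := PySem.Chars.lower line.toList
  (List.range (cl.length + 1)).any
    (fun i => pvJournalKeywords.any (fun k => k.toList.isPrefixOf (cl.drop i)))

-- ===== PRECONDITION & SPEC =====
def Spec_is_journal_header_line (line : String) (out : Bool) : Prop := out = is_journal_header_line_alt line
instance (line : String) (out : Bool) : Decidable (Spec_is_journal_header_line line out) := by unfold Spec_is_journal_header_line; infer_instance

-- ===== CLAIM (what is proved, stated in full; the proofs are below) =====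
def Claim_equal_is_journal_header_line : Prop := ∀ (line : String), Dom_is_journal_header_line line → Spec_is_journal_header_line line (is_journal_header_line line)

-- ===== LEMMAS AND PROOFS =====

-- A's per-keyword substring test equals B's per-position prefix scan
theorem pv_scan_eq (s : List Char) (kws : List String) :
    (kws.any fun k => PySem.Chars.isIn k.toList s)
      = ((List.range (s.length + 1)).any fun i =>
          kws.any fun k => k.toList.isPrefixOf (s.drop i)) := by
  rw [Bool.eq_iff_iff]
  simp only [List.any_eq_true, List.mem_range, List.isPrefixOf_iff_prefix]
  constructor
  · rintro ⟨k, hk, hin⟩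
    obtain ⟨j, hj⟩ := (PySem.Chars.exists_prefix_drop_iff_isIn k.toList s).mpr hin
    by_cases hjs : j ≤ s.length
    · exact ⟨j, by omega, k, hk, hj⟩
    · refine ⟨s.length, by omega, k, hk, ?_⟩
      rw [List.drop_eq_nil_of_le (by omega)] at hj
      simp [List.prefix_nil.mp hj]
  · rintro ⟨i, _, k, hk, hp⟩
    exact ⟨k, hk, (PySem.Chars.exists_prefix_drop_iff_isIn k.toList s).mp ⟨i, hp⟩⟩

-- ===== VERDICT (by name: the statement is the Claim_ definition above) =====
theorem is_journal_header_line_spec : Claim_equal_is_journal_header_line := by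
  intro line _
  unfold Spec_is_journal_header_line is_journal_header_line is_journal_header_line_alt
  simp only [PySem.Str.isIn_eq, PySem.Str.toList_lower]
  exact pv_scan_eq (PySem.Chars.lower line.toList) pvJournalKeywords
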